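-- pv_equiv track=rewrite | github.com/hoangkienlc02/ATTT-PTIT | Code PTIT/Code Python PTIT/PERFECT PRIME.py | check
-- ===== SOURCE A (Python) =====
-- import math
--
-- def nto(n) :
--     if (n < 2) : return False
--     for i in range(2, int(math.sqrt(n)) + 1) :
--         if (n % i == 0) : return False
--     return True
--
-- def check(n):
--     k = 0
--     sum = 0
--     a = n
--     while(n != 0):
--         i = n % 10
--         if(nto(i) != True): return False
--         k = k * 10 + i
--         sum += i
--         n //= 10
--     if(nto(a) and nto(sum) and nto(k)): return True
--     return False
-- ===== SOURCE B (Python) =====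
-- def _is_prime(m):
--     if m < 2:
--         return False
--     if m < 4:
--         return True
--     if m % 2 == 0 or m % 3 == 0:
--         return False
--     i = 5
--     while i * i <= m:
--         if m % i == 0 or m % (i + 2) == 0:
--             return False
--         i += 6
--     return True
--
--
-- def check(n):
--     s = str(n)
--     if not set(s) <= set("2357"):
--         return False
--     digits = [int(c) for c in s]
--     total = sum(digits)
--     rev = sum(d * 10 ** i for i, d in enumerate(digits))
--     return _is_prime(n) and _is_prime(total) and _is_prime(rev)
-- ===== Notes on version B (the rewrite author's own statement) =====
-- stated objective: alternative
-- what changed: B works in separate stages over the decimal string instead of A's single %10///10 loop: a set-subset test set(s) <= set('2357') validates all digits at once (handling negatives and 0 with no special case), the digit sum is the builtin sum over a digit list, the reversed value is a closed-form power sum over enumerate (not a Horner fold), and primality uses a 6k+-1 wheel (no sqrt) instead of A's range(2, int(math.sqrt(n))+1) scan.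
import Mathlib
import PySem

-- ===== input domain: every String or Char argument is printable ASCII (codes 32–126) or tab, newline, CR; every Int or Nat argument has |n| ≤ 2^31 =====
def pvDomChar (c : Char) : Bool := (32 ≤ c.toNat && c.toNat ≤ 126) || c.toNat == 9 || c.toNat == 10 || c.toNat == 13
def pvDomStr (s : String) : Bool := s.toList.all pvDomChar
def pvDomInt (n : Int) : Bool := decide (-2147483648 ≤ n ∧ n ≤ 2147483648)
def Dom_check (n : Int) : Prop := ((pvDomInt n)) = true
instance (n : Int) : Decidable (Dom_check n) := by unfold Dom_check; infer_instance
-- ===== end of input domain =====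

-- B re-implements check in stages over the decimal string: a set-subset test of its characters
-- against {'2','3','5','7'}, a digit list with built-in sum, the reversed value as a closed-form
-- power sum over enumerate, and a 6k±1-wheel primality test; same return value as A everywhere
-- (alternative decomposition, no speed claim).

-- ===== PORT A =====
-- nto: `int(math.sqrt(n))` is ported as Nat.sqrt, which is exact here (every argument nto
-- receives from check is < 2^52, where the float sqrt of an int truncates to the integer
-- square root); the for/early-return is the `any` over the same range.
def ntoA (n : Int) : Bool :=
  if n < 2 then false
  else !((PySem.List.pyRange 2 ((Nat.sqrt n.toNat : Int) + 1) 1).any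
      (fun i => PySem.Int.mod n i == 0))

-- the while loop of `check`; the fuel bounds the iteration count (n shrinks towards zero by
-- floor division each step, and a negative n reaches a non-prime digit), so fuel never runs out.
def checkRec : Nat → Int → Int → Int → Int → Bool
  | 0, _, _, _, _ => false
  | fuel+1, n, k, s, a =>
    if n = 0 then ntoA a && ntoA s && ntoA k
    else
      let i := PySem.Int.mod n 10
      if (ntoA i != true) then false
      else checkRec fuel (PySem.Int.floordiv n 10) (k * 10 + i) (s + i) a

def check (n : Int) : Bool := checkRec (n.natAbs + 2) n 0 0 n

-- ===== PORT B =====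
-- _is_prime's 6k±1 wheel loop (m, i are Python ints that are ≥ 0 on every path that reaches
-- the loop, so the Nat transcription is exact)
def wheelB (m i : Nat) : Bool :=
  if i * i ≤ m then
    (if m % i == 0 || m % (i + 2) == 0 then false else wheelB m (i + 6))
  else true
termination_by m + 1 - i
decreasing_by
  rcases Nat.eq_zero_or_pos i with h0 | hpos
  · omega
  · have : i ≤ i * i := Nat.le_mul_of_pos_left i hpos
    omega

def ntoB (m : Int) : Bool :=
  if m < 2 then false
  else if m < 4 then true
  else if PySem.Int.mod m 2 == 0 || PySem.Int.mod m 3 == 0 then false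
  else wheelB m.toNat 5

-- int(c) for a single decimal-digit char; exact here: check_alt applies it only after the
-- subset guard has ensured every character of s is one of '2','3','5','7'.
def digitVal (c : Char) : Int := (c.toNat : Int) - 48

def check_alt (n : Int) : Bool :=
  let s := PySem.Int.toChars n
  if !(PySem.Set.issubset (PySem.Set.ofList s) (PySem.Set.ofList ['2', '3', '5', '7'])) then
    false
  else
    let digits := s.map digitVal
    let total := digits.sum
    let rev := ((PySem.List.enumerate digits 0).map (fun p => p.2 * 10 ^ p.1.toNat)).sum
    ntoB n && ntoB total && ntoB rev

-- ===== PRECONDITION & SPEC =====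
def Spec_check (n : Int) (out : Bool) : Prop := out = check_alt n
instance (n : Int) (out : Bool) : Decidable (Spec_check n out) := by unfold Spec_check; infer_instance

-- ===== CLAIM (what is proved, stated in full; the proofs are below) =====
def Claim_equal_check : Prop := ∀ (n : Int), Dom_check n → Spec_check n (check n)

-- ===== LEMMAS AND PROOFS =====

-- prime-digit test (proof-side abbreviation for the digit set {2,3,5,7})
def primeDig (d : Nat) : Bool := d == 2 || d == 3 || d == 5 || d == 7

-- the value A's accumulator k reaches: foldl over the LSB-first digit list
def digFold (ds : List Nat) (k : Int) : Int :=
  ds.foldl (fun (k : Int) (d : Nat) => k * 10 + (d : Int)) k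

-- the value of B's power sum read MSB-first, with running power p
def revVal (p : Int) : List Nat → Int
  | [] => 0
  | e :: tl => (e : Int) * p + revVal (p * 10) tl

lemma natSqrt_eq (n k : Nat) (h1 : k * k ≤ n) (h2 : n < (k + 1) * (k + 1)) :
    Nat.sqrt n = k := (Nat.eq_sqrt.mpr ⟨h1, h2⟩).symm

lemma ntoA_digit (d : Nat) (hd : d < 10) : ntoA (d : Int) = primeDig d := by
  interval_cases d
  · decide
  · decide
  · simp only [ntoA]; rw [natSqrt_eq _ 1 (by decide) (by decide)]; decide
  · simp only [ntoA]; rw [natSqrt_eq _ 1 (by decide) (by decide)]; decide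
  · simp only [ntoA]; rw [natSqrt_eq _ 2 (by decide) (by decide)]; decide
  · simp only [ntoA]; rw [natSqrt_eq _ 2 (by decide) (by decide)]; decide
  · simp only [ntoA]; rw [natSqrt_eq _ 2 (by decide) (by decide)]; decide
  · simp only [ntoA]; rw [natSqrt_eq _ 2 (by decide) (by decide)]; decide
  · simp only [ntoA]; rw [natSqrt_eq _ 2 (by decide) (by decide)]; decide
  · simp only [ntoA]; rw [natSqrt_eq _ 3 (by decide) (by decide)]; decide

lemma ntoA_iff (m : Nat) (hm : 2 ≤ m) :
    ntoA (m : Int) = true ↔ ∀ j, 2 ≤ j → j * j ≤ m → ¬ j ∣ m := by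
  unfold ntoA
  have h2 : ¬ ((m : Int) < 2) := by exact_mod_cast not_lt.mpr (by exact_mod_cast hm)
  rw [if_neg h2]
  have htn : ((m : Int)).toNat = m := Int.toNat_natCast m
  rw [htn]
  simp only [Bool.not_eq_eq_eq_not, Bool.not_true, List.any_eq_false]
  constructor
  · intro H j hj hjm hdvd
    have hjs : j ≤ Nat.sqrt m := Nat.le_sqrt.mpr hjm
    have hmem : (j : Int) ∈ PySem.List.pyRange 2 ((Nat.sqrt m : Int) + 1) 1 := by
      rw [PySem.List.mem_pyRange_one]
      exact ⟨by exact_mod_cast hj, by exact_mod_cast Nat.lt_succ_of_le hjs⟩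
    have hf := H _ hmem
    simp only [beq_eq_false_iff_ne, ne_eq] at hf
    apply hf
    rw [beq_iff_eq, PySem.Int.mod_eq_zero_iff_dvd]
    exact_mod_cast hdvd
  · intro H x hx
    rw [PySem.List.mem_pyRange_one] at hx
    obtain ⟨hx2, hxlt⟩ := hx
    have hx0 : 0 ≤ x := le_trans (by norm_num) hx2
    obtain ⟨j, rfl⟩ := Int.eq_ofNat_of_zero_le hx0
    simp only [beq_eq_false_iff_ne, ne_eq]
    intro hmod
    rw [beq_iff_eq, PySem.Int.mod_eq_zero_iff_dvd] at hmod
    have hdvd : j ∣ m := by exact_mod_cast hmod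
    have hj2 : 2 ≤ j := by exact_mod_cast hx2
    have hjlt : j < Nat.sqrt m + 1 := by exact_mod_cast hxlt
    exact H j hj2 (Nat.le_sqrt.mp (by omega)) hdvd

-- the 6k±1 wheel, under the invariant i ≡ 5 (mod 6) and "no divisor below i"
lemma wheelB_iff (m : Nat) (h2 : ¬ 2 ∣ m) (h3 : ¬ 3 ∣ m) :
    ∀ i, i % 6 = 5 → (∀ j, 2 ≤ j → j < i → ¬ j ∣ m) →
      (wheelB m i = true ↔ ∀ j, 2 ≤ j → j * j ≤ m → ¬ j ∣ m) := by
  intro i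
  fun_induction wheelB m i with
  | case1 i hle hdvd =>
    -- a divisor was found at i or i + 2
    intro hi hprev
    simp only [Bool.false_eq_true, false_iff]
    intro H
    rcases Bool.or_eq_true _ _ |>.mp hdvd with hd | hd
    · have hidvd : i ∣ m := Nat.dvd_of_mod_eq_zero (by simpa using hd)
      exact H i (by omega) hle hidvd
    · have hddvd : (i + 2) ∣ m := Nat.dvd_of_mod_eq_zero (by simpa using hd)
      by_cases hbig : (i + 2) * (i + 2) ≤ m
      · exact H (i + 2) (by omega) hbig hddvd
      · -- the cofactor q = m / (i+2) is a small divisor with q * q ≤ m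
        obtain ⟨q, hq⟩ := hddvd
        have hq2 : 2 ≤ q := by
          rcases Nat.lt_or_ge q 2 with hlt | hge
          · interval_cases q
            · -- q = 0: m = 0, contradicting ¬ 2 ∣ m
              have hm0 : m = 0 := by simpa using hq
              omega
            · -- q = 1: m = i + 2, but i * i ≤ m forces i ≤ 2 < 5 ≤ i
              exfalso
              have hm1 : m = i + 2 := by simpa using hq
              have hi5 : 5 ≤ i := by omega
              nlinarith
          · exact hge
        have hqdvd : q ∣ m := ⟨i + 2, by rw [hq, Nat.mul_comm]⟩
        have hqq : q * q ≤ m := by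
          have hqle : q ≤ i + 2 := by nlinarith [hq, hbig]
          calc q * q ≤ (i + 2) * q := Nat.mul_le_mul_right _ hqle
          _ = m := hq.symm
        exact H q hq2 hqq hqdvd
  | case2 i hle hdvd ih =>
    intro hi hprev
    apply ih (by omega)
    intro j hj2 hjlt
    rcases Nat.lt_or_ge j i with hlt | hge
    · exact hprev j hj2 hlt
    · have hndvd : ¬ m % i = 0 ∧ ¬ m % (i + 2) = 0 := by
        simp only [Bool.or_eq_true, beq_iff_eq, not_or] at hdvd
        exact hdvd
      -- j ∈ [i, i+6): the wheel tested i and i+2; the other four are divisible by 2 or 3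
      intro hjm
      have hcase : j = i ∨ j = i + 1 ∨ j = i + 2 ∨ j = i + 3 ∨ j = i + 4 ∨ j = i + 5 := by
        omega
      rcases hcase with rfl | rfl | rfl | rfl | rfl | rfl
      · exact hndvd.1 (Nat.dvd_iff_mod_eq_zero.mp hjm)
      · exact h2 (dvd_trans (by omega : 2 ∣ i + 1) hjm)
      · exact hndvd.2 (Nat.dvd_iff_mod_eq_zero.mp hjm)
      · exact h2 (dvd_trans (by omega : 2 ∣ i + 3) hjm)
      · exact h3 (dvd_trans (by omega : 3 ∣ i + 4) hjm)
      · exact h2 (dvd_trans (by omega : 2 ∣ i + 5) hjm)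
  | case3 i hgt =>
    intro hi hprev
    simp only [true_iff]
    intro j hj2 hjm hdvd
    have hji : j < i := by
      by_contra hge
      exact hgt (le_trans (Nat.mul_le_mul (by omega) (by omega)) hjm)
    exact hprev j hj2 hji hdvd

lemma nto_eq (x : Int) (hx : 0 ≤ x) : ntoA x = ntoB x := by
  obtain ⟨m, rfl⟩ := Int.eq_ofNat_of_zero_le hx
  by_cases hm : 2 ≤ m
  · have h2i : ¬ ((m : Int) < 2) := by exact_mod_cast not_lt.mpr (by exact_mod_cast hm)
    unfold ntoB
    rw [if_neg h2i]
    by_cases h4 : m < 4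
    · rw [if_pos (by exact_mod_cast h4)]
      rw [(ntoA_iff m hm).mpr ?_]
      intro j hj2 hjj hdvd
      nlinarith
    · rw [if_neg (by exact_mod_cast h4)]
      have hmod2 : PySem.Int.mod (m : Int) 2 = ((m % 2 : Nat) : Int) := by
        exact_mod_cast PySem.Int.mod_natCast m 2
      have hmod3 : PySem.Int.mod (m : Int) 3 = ((m % 3 : Nat) : Int) := by
        exact_mod_cast PySem.Int.mod_natCast m 3
      by_cases hdd : m % 2 = 0 ∨ m % 3 = 0
      · have hcond : (PySem.Int.mod (m : Int) 2 == 0 || PySem.Int.mod (m : Int) 3 == 0) = true := by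
          rw [Bool.or_eq_true]
          rcases hdd with h | h
          · exact Or.inl (by rw [beq_iff_eq, hmod2, h]; decide)
          · exact Or.inr (by rw [beq_iff_eq, hmod3, h]; decide)
        rw [if_pos hcond]
        cases hA : ntoA (m : Int) with
        | false => rfl
        | true =>
          exfalso
          have hchar := (ntoA_iff m hm).mp hA
          rcases hdd with h | h
          · exact hchar 2 (by omega) (by omega) (Nat.dvd_of_mod_eq_zero h)
          · by_cases he : m % 2 = 0
            · exact hchar 2 (by omega) (by omega) (Nat.dvd_of_mod_eq_zero he)
            · exact hchar 3 (by omega) (by omega) (Nat.dvd_of_mod_eq_zero h)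
      · push_neg at hdd
        have h2d : ¬ 2 ∣ m := fun h => hdd.1 (Nat.dvd_iff_mod_eq_zero.mp h)
        have h3d : ¬ 3 ∣ m := fun h => hdd.2 (Nat.dvd_iff_mod_eq_zero.mp h)
        have hcond : (PySem.Int.mod (m : Int) 2 == 0 || PySem.Int.mod (m : Int) 3 == 0) = false := by
          rw [Bool.or_eq_false_iff]
          refine ⟨?_, ?_⟩
          · rw [beq_eq_false_iff_ne, hmod2]
            exact fun h => hdd.1 (by exact_mod_cast h)
          · rw [beq_eq_false_iff_ne, hmod3]
            exact fun h => hdd.2 (by exact_mod_cast h)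
        rw [if_neg (by rw [hcond]; simp)]
        rw [Int.toNat_natCast]
        have hprev : ∀ j, 2 ≤ j → j < 5 → ¬ j ∣ m := by
          intro j hj2 hj5 hdvd
          interval_cases j
          · exact h2d hdvd
          · exact h3d hdvd
          · exact h2d (dvd_trans (by omega) hdvd)
        exact Bool.eq_iff_iff.mpr
          ((ntoA_iff m hm).trans (wheelB_iff m h2d h3d 5 (by omega) hprev).symm)
  · have hlt : (m : Int) < 2 := by exact_mod_cast not_le.mp hm
    unfold ntoA ntoB
    rw [if_pos hlt, if_pos hlt]

-- `str` of a positive number: LSB-first digit list, mapped to chars, reversed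
lemma toDigitsCore_eq (f : Nat) : ∀ m, 0 < m → m < 10 ^ f → ∀ l,
    Nat.toDigitsCore 10 (f + 1) m l = ((Nat.digits 10 m).map Nat.digitChar).reverse ++ l := by
  induction f with
  | zero => intro m hm hlt l; omega
  | succ f ih =>
    intro m hm hlt l
    have hdig : Nat.digits 10 m = m % 10 :: Nat.digits 10 (m / 10) :=
      Nat.digits_def' (by norm_num) hm
    by_cases h0 : m / 10 = 0
    · rw [Nat.toDigitsCore]
      simp [h0, hdig]
    · rw [Nat.toDigitsCore]
      have hlt' : m / 10 < 10 ^ f := by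
        have hps : (10 : Nat) ^ (f + 1) = 10 ^ f * 10 := pow_succ 10 f
        omega
      simp only [h0, if_false]
      rw [ih (m / 10) (Nat.pos_of_ne_zero h0) hlt' _, hdig]
      simp

lemma toChars_pos (m : Nat) (hm : 0 < m) :
    PySem.Int.toChars (m : Int) = ((Nat.digits 10 m).map Nat.digitChar).reverse := by
  unfold PySem.Int.toChars
  rw [if_neg (by exact_mod_cast Nat.not_lt.mpr (Nat.zero_le m) : ¬ ((m : Int) < 0))]
  rw [Int.toNat_natCast]
  simp only [Nat.toDigits]
  simpa using toDigitsCore_eq m m hm (Nat.lt_pow_self (by norm_num)) []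

-- each digit char maps back through `ord - 48`
lemma digitChar_val (d : Nat) (hd : d < 10) : digitVal (Nat.digitChar d) = (d : Int) := by
  interval_cases d <;> decide

lemma digitChar_mem (d : Nat) (hd : d < 10) :
    (Nat.digitChar d ∈ (['2', '3', '5', '7'] : List Char)) ↔ primeDig d = true := by
  interval_cases d <;> decide

lemma digFold_cons (d : Nat) (tl : List Nat) (k : Int) :
    digFold (d :: tl) k = digFold tl (k * 10 + (d : Int)) := by
  simp [digFold]

-- B's power sum over enumerate equals revVal
lemma powSum_eq_revVal (es : List Nat) : ∀ j : Nat,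
    ((PySem.List.enumerate (es.map (Nat.cast : Nat → Int)) (j : Int)).map
        (fun p => p.2 * 10 ^ p.1.toNat)).sum = revVal (10 ^ j) es := by
  induction es with
  | nil => intro j; simp [PySem.List.enumerate_nil, revVal]
  | cons e tl ih =>
    intro j
    rw [List.map_cons, PySem.List.enumerate_cons]
    have hcast : ((j : Int) + 1) = ((j + 1 : Nat) : Int) := by push_cast; ring
    rw [List.map_cons, List.sum_cons, hcast, ih (j + 1)]
    simp only [revVal, Int.toNat_natCast]
    have hp : (10 : Int) ^ j * 10 = 10 ^ (j + 1) := by ring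
    rw [← hp]

-- revVal equals A's k-fold of the reversed list
lemma revVal_eq_digFold (es : List Nat) : ∀ p : Int,
    revVal p es = p * digFold es.reverse 0 := by
  induction es with
  | nil => intro p; simp [revVal, digFold]
  | cons e tl ih =>
    intro p
    simp only [revVal, List.reverse_cons]
    rw [ih (p * 10)]
    have happ : digFold (tl.reverse ++ [e]) 0 = digFold tl.reverse 0 * 10 + (e : Int) := by
      simp [digFold, List.foldl_append]
    rw [happ]
    ring

-- one unfolding of A's while loop
lemma checkRec_succ (f : Nat) (n k s a : Int) (hn : n ≠ 0) :
    checkRec (f + 1) n k s a =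
      (if ntoA (PySem.Int.mod n 10) = true
       then checkRec f (PySem.Int.floordiv n 10)
              (k * 10 + PySem.Int.mod n 10) (s + PySem.Int.mod n 10) a
       else false) := by
  simp only [checkRec]
  rw [if_neg hn]
  cases h : ntoA (PySem.Int.mod n 10) <;> simp [h]

-- A's loop on a non-negative argument, characterized by the digit list
lemma loopA_eq (m : Nat) : ∀ fuel, (Nat.digits 10 m).length < fuel → ∀ k s a : Int,
    checkRec fuel (m : Int) k s a =
      ((Nat.digits 10 m).all primeDig &&
        (ntoA a && ntoA (s + ((Nat.digits 10 m).sum : Int)) &&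
          ntoA (digFold (Nat.digits 10 m) k))) := by
  induction m using Nat.strong_induction_on with
  | _ m ihm =>
    intro fuel hfuel k s a
    match fuel, hfuel with
    | fuel + 1, hfuel =>
      by_cases hm : m = 0
      · subst hm
        simp [checkRec, digFold]
      · have hm' : 0 < m := Nat.pos_of_ne_zero hm
        have hdig : Nat.digits 10 m = m % 10 :: Nat.digits 10 (m / 10) :=
          Nat.digits_def' (by norm_num) hm'
        have hmod : PySem.Int.mod (m : Int) 10 = ((m % 10 : Nat) : Int) := by
          exact_mod_cast PySem.Int.mod_natCast m 10
        have hdivcast : PySem.Int.floordiv (m : Int) 10 = ((m / 10 : Nat) : Int) := by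
          exact_mod_cast PySem.Int.floordiv_natCast m 10
        rw [checkRec_succ fuel (m : Int) k s a (by exact_mod_cast hm)]
        rw [hmod, ntoA_digit (m % 10) (Nat.mod_lt _ (by norm_num))]
        have hlen : (Nat.digits 10 (m / 10)).length < fuel := by
          rw [hdig] at hfuel
          simpa using Nat.lt_of_succ_lt_succ hfuel
        cases hp : primeDig (m % 10) with
        | false =>
          rw [if_neg (by simp)]
          rw [hdig]
          simp [List.all_cons, hp]
        | true =>
          rw [if_pos rfl, hdivcast]
          rw [ihm (m / 10) (Nat.div_lt_self hm' (by norm_num)) fuel hlen]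
          have e3 : (Nat.digits 10 m).all primeDig = (Nat.digits 10 (m / 10)).all primeDig := by
            rw [hdig]; simp [List.all_cons, hp]
          have e1 : s + ((Nat.digits 10 m).sum : Int) =
              s + ((m % 10 : Nat) : Int) + ((Nat.digits 10 (m / 10)).sum : Int) := by
            rw [hdig, List.sum_cons]; push_cast; ring
          have e2 : digFold (Nat.digits 10 m) k =
              digFold (Nat.digits 10 (m / 10)) (k * 10 + ((m % 10 : Nat) : Int)) := by
            rw [hdig, digFold_cons]
          rw [e3, e1, e2]
    | 0, hfuel => omega

-- A's loop on a negative argument always returns False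
lemma loopA_neg : ∀ fuel (n : Int), n < 0 → n.natAbs < fuel → ∀ k s a : Int,
    checkRec fuel n k s a = false := by
  intro fuel
  induction fuel with
  | zero => intro n hn habs; omega
  | succ f ih =>
    intro n hn habs k s a
    rw [checkRec_succ f n k s a (by omega)]
    have hi0 : 0 ≤ PySem.Int.mod n 10 := PySem.Int.mod_nonneg n (by norm_num)
    have hi10 : PySem.Int.mod n 10 < 10 := PySem.Int.mod_lt n (by norm_num)
    obtain ⟨d, hd⟩ := Int.eq_ofNat_of_zero_le hi0
    have hd10 : d < 10 := by omega
    rw [hd, ntoA_digit d hd10]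
    cases hp : primeDig d with
    | false => rw [if_neg (by simp)]
    | true =>
      rw [if_pos rfl]
      have hidentity := PySem.Int.floordiv_mul_add_mod n 10
      rw [hd] at hidentity
      have h9 : d ≠ 9 := by
        intro h
        subst h
        simp [primeDig] at hp
      have hn' : PySem.Int.floordiv n 10 < 0 := by omega
      have habs' : (PySem.Int.floordiv n 10).natAbs < n.natAbs := by omega
      exact ih _ hn' (by omega) _ _ _

-- B's subset test on the decimal string of a positive number = "all digits prime"
lemma subset_eq_all (m : Nat) (hm : 0 < m) :
    PySem.Set.issubset (PySem.Set.ofList (PySem.Int.toChars (m : Int)))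
        (PySem.Set.ofList ['2', '3', '5', '7']) = (Nat.digits 10 m).all primeDig := by
  rw [toChars_pos m hm]
  cases hall : (Nat.digits 10 m).all primeDig with
  | true =>
    rw [(PySem.Set.issubset_iff _ _).mpr ?_]
    intro c hc
    rw [PySem.Set.mem_ofList] at hc
    rw [List.mem_reverse, List.mem_map] at hc
    obtain ⟨d, hdmem, rfl⟩ := hc
    have hd10 : d < 10 := Nat.digits_lt_base (by norm_num) hdmem
    rw [PySem.Set.mem_ofList]
    exact (digitChar_mem d hd10).mpr (List.all_eq_true.mp hall d hdmem)
  | false =>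
    rw [List.all_eq_false] at hall
    obtain ⟨d, hdmem, hdp⟩ := hall
    have hd10 : d < 10 := Nat.digits_lt_base (by norm_num) hdmem
    rw [Bool.eq_false_iff]
    intro hsub
    have hc := (PySem.Set.issubset_iff _ _).mp hsub (Nat.digitChar d) ?_
    · rw [PySem.Set.mem_ofList] at hc
      exact hdp ((digitChar_mem d hd10).mp hc)
    · rw [PySem.Set.mem_ofList, List.mem_reverse, List.mem_map]
      exact ⟨d, hdmem, rfl⟩

lemma digFold_nonneg (ds : List Nat) : ∀ k : Int, 0 ≤ k → 0 ≤ digFold ds k := by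
  induction ds with
  | nil => intro k hk; simpa [digFold] using hk
  | cons d tl ih =>
    intro k hk
    rw [digFold_cons]
    exact ih _ (by positivity)

lemma digits_len_le (m : Nat) : (Nat.digits 10 m).length ≤ m := by
  induction m using Nat.strong_induction_on with
  | _ m ih =>
    by_cases h : m = 0
    · subst h; simp
    · rw [Nat.digits_def' (by norm_num) (Nat.pos_of_ne_zero h)]
      have h1 := ih (m / 10) (Nat.div_lt_self (Nat.pos_of_ne_zero h) (by norm_num))
      have h2 : m / 10 < m := Nat.div_lt_self (Nat.pos_of_ne_zero h) (by norm_num)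
      simp only [List.length_cons]
      omega

-- ===== VERDICT (by name: the statement is the Claim_ definition above) =====
theorem check_spec : Claim_equal_check := by
  intro n _
  unfold Spec_check check
  rcases lt_trichotomy n 0 with hneg | hzero | hpos
  · rw [loopA_neg (n.natAbs + 2) n hneg (by omega)]
    simp only [check_alt]
    have hminus : '-' ∈ PySem.Int.toChars n := by
      unfold PySem.Int.toChars
      rw [if_pos hneg]
      exact List.mem_cons_self ..
    have hsub : PySem.Set.issubset (PySem.Set.ofList (PySem.Int.toChars n))
        (PySem.Set.ofList ['2', '3', '5', '7']) = false := by
      rw [Bool.eq_false_iff]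
      intro h
      have := (PySem.Set.issubset_iff _ _).mp h '-'
        ((PySem.Set.mem_ofList _ _).mpr hminus)
      rw [PySem.Set.mem_ofList] at this
      simp at this
    simp [hsub]
  · subst hzero
    decide
  · obtain ⟨m, rfl⟩ := Int.eq_ofNat_of_zero_le (le_of_lt hpos)
    have hm : 0 < m := by exact_mod_cast hpos
    have habs : ((m : Int).natAbs + 2) = m + 2 := by simp
    rw [habs, loopA_eq m (m + 2) (by have := digits_len_le m; omega) 0 0 (m : Int)]
    simp only [check_alt]
    rw [subset_eq_all m hm]
    cases hall : (Nat.digits 10 m).all primeDig with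
    | false => simp
    | true =>
      rw [if_neg (by decide)]
      simp only [Bool.true_and]
      have hmap : (PySem.Int.toChars (m : Int)).map digitVal =
          ((Nat.digits 10 m).reverse).map (Nat.cast : Nat → Int) := by
        rw [toChars_pos m hm, ← List.map_reverse, List.map_map]
        apply List.map_congr_left
        intro d hd
        exact digitChar_val d (Nat.digits_lt_base (by norm_num) (List.mem_reverse.mp hd))
      rw [hmap]
      have hsum : (((Nat.digits 10 m).reverse).map (Nat.cast : Nat → Int)).sum =
          ((Nat.digits 10 m).sum : Int) := by
        rw [List.map_reverse, List.sum_reverse]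
        exact_mod_cast (Nat.cast_list_sum (Nat.digits 10 m)).symm
      have hrev : ((PySem.List.enumerate
            (((Nat.digits 10 m).reverse).map (Nat.cast : Nat → Int)) 0).map
            (fun p => p.2 * 10 ^ p.1.toNat)).sum = digFold (Nat.digits 10 m) 0 := by
        have hps := powSum_eq_revVal (Nat.digits 10 m).reverse 0
        rw [revVal_eq_digFold, List.reverse_reverse, pow_zero, one_mul] at hps
        simp only [Nat.cast_zero] at hps
        exact hps
      rw [hsum, hrev]
      rw [nto_eq (m : Int) (Int.natCast_nonneg m),
          nto_eq (0 + ((Nat.digits 10 m).sum : Int)) (by positivity),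
          nto_eq (digFold (Nat.digits 10 m) 0) (digFold_nonneg (Nat.digits 10 m) 0 le_rfl)]
      simp only [zero_add]
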